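-- pv_equiv track=rewrite | github.com/Inevitable-Reaper/Cadgen | cadgen_project/agents/planner_agent.py | _detect_process
-- ===== SOURCE A (Python) =====
-- def _detect_process(text: str) -> str:
--     """Auto-detect manufacturing process from text"""
--     text_lower = text.lower()
--     if any(word in text_lower for word in ['print', '3d', 'fdm', 'sla']):
--         return "3d_printing"
--     elif any(word in text_lower for word in ['laser', 'cut', 'engrave']):
--         return "laser_cutting"
--     elif any(word in text_lower for word in ['cnc', 'mill', 'machine']):
--         return "cnc_milling"
--     elif any(word in text_lower for word in ['sheet', 'bend', 'fold']):
--         return "sheet_metal"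
--     elif any(word in text_lower for word in ['mold', 'inject', 'cast']):
--         return "injection_molding"
--     else:
--         return "general_cad"
-- ===== SOURCE B (Python) =====
-- # B: aggregate over a flat keyword->priority map, take the minimum matched
-- # priority, and index a label table -- no first-match if/elif chain.
-- _KEYWORD_PRIORITY = {
--     'print': 0, '3d': 0, 'fdm': 0, 'sla': 0,
--     'laser': 1, 'cut': 1, 'engrave': 1,
--     'cnc': 2, 'mill': 2, 'machine': 2,
--     'sheet': 3, 'bend': 3, 'fold': 3,
--     'mold': 4, 'inject': 4, 'cast': 4,
-- }
-- _LABELS = ["3d_printing", "laser_cutting", "cnc_milling",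
--            "sheet_metal", "injection_molding", "general_cad"]
--
-- def _detect_process(text: str) -> str:
--     t = text.lower()
--     best = 5
--     for kw, p in _KEYWORD_PRIORITY.items():
--         if kw in t:
--             best = min(best, p)
--     return _LABELS[best]
-- ===== Notes on version B (the rewrite author's own statement) =====
-- stated objective: alternative
-- what changed: B makes one pass over a flat keyword-to-priority map computing the MINIMUM priority among all matched keywords and indexes a label array with it, instead of A's ordered first-match if/elif chain over keyword groups.
import Mathlib
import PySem

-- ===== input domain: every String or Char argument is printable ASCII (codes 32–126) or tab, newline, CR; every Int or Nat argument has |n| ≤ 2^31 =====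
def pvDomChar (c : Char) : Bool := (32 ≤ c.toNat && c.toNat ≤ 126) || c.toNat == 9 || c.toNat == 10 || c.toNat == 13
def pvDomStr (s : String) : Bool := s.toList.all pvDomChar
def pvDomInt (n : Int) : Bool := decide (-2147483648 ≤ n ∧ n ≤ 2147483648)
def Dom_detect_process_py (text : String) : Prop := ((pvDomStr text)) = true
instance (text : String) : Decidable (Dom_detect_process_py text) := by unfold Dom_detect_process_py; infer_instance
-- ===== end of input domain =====

-- B replaces A's ordered first-match elif chain by a one-pass minimum of matched
-- keyword priorities over a flat keyword→priority map, indexed into a label table (alternative).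

-- ===== PORT A =====
def detect_process_py (text : String) : String :=
  let text_lower := PySem.Str.lower text
  if (["print", "3d", "fdm", "sla"] : List String).any (fun word => PySem.Str.isIn word text_lower) then
    "3d_printing"
  else if (["laser", "cut", "engrave"] : List String).any (fun word => PySem.Str.isIn word text_lower) then
    "laser_cutting"
  else if (["cnc", "mill", "machine"] : List String).any (fun word => PySem.Str.isIn word text_lower) then
    "cnc_milling"
  else if (["sheet", "bend", "fold"] : List String).any (fun word => PySem.Str.isIn word text_lower) then
    "sheet_metal"
  else if (["mold", "inject", "cast"] : List String).any (fun word => PySem.Str.isIn word text_lower) then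
    "injection_molding"
  else
    "general_cad"

-- ===== PORT B =====
def pvKeywordPriority : List (String × Nat) :=
  [("print", 0), ("3d", 0), ("fdm", 0), ("sla", 0),
   ("laser", 1), ("cut", 1), ("engrave", 1),
   ("cnc", 2), ("mill", 2), ("machine", 2),
   ("sheet", 3), ("bend", 3), ("fold", 3),
   ("mold", 4), ("inject", 4), ("cast", 4)]

def pvLabels : List String :=
  ["3d_printing", "laser_cutting", "cnc_milling", "sheet_metal", "injection_molding", "general_cad"]

def detect_process_py_alt (text : String) : String :=
  let t := PySem.Str.lower text
  let best := pvKeywordPriority.foldl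
    (fun best kp => if PySem.Str.isIn kp.1 t then min best kp.2 else best) 5
  -- _LABELS[best]: best is always ≤ 5, so the index is in range and getD is exact here
  pvLabels.getD best ""

-- ===== PRECONDITION & SPEC =====
def Spec_detect_process_py (text : String) (out : String) : Prop := out = detect_process_py_alt text
instance (text : String) (out : String) : Decidable (Spec_detect_process_py text out) := by unfold Spec_detect_process_py; infer_instance

-- ===== CLAIM (what is proved, stated in full; the proofs are below) =====
def Claim_equal_detect_process_py : Prop := ∀ (text : String), Dom_detect_process_py text → Spec_detect_process_py text (detect_process_py text)

-- ===== LEMMAS AND PROOFS =====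

-- folding min over a group of keywords that all carry the same priority p
theorem foldl_min_group (t : String) (kws : List String) (p acc : Nat) :
    (kws.map (fun kw => (kw, p))).foldl
      (fun best kp => if PySem.Str.isIn kp.1 t then min best kp.2 else best) acc
    = if kws.any (fun word => PySem.Str.isIn word t) then min acc p else acc := by
  induction kws generalizing acc with
  | nil => simp
  | cons kw rest ih =>
    simp only [List.map_cons, List.foldl_cons, List.any_cons]
    by_cases h : PySem.Str.isIn kw t = true
    · simp only [h, if_true, Bool.true_or, ih]
      cases hr : rest.any (fun word => PySem.Str.isIn word t) <;>
        simp
    · have hf : PySem.Str.isIn kw t = false := eq_false_of_ne_true h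
      rw [if_neg h, ih]
      simp only [hf, Bool.false_or]

-- ===== VERDICT (by name: the statement is the Claim_ definition above) =====
theorem detect_process_py_spec : Claim_equal_detect_process_py := by
  intro text _
  simp only [Spec_detect_process_py, detect_process_py, detect_process_py_alt]
  set t := PySem.Str.lower text
  have htab : pvKeywordPriority
      = ((["print", "3d", "fdm", "sla"] : List String).map (fun kw => (kw, (0 : Nat))))
        ++ ((["laser", "cut", "engrave"] : List String).map (fun kw => (kw, (1 : Nat))))
        ++ ((["cnc", "mill", "machine"] : List String).map (fun kw => (kw, (2 : Nat))))
        ++ ((["sheet", "bend", "fold"] : List String).map (fun kw => (kw, (3 : Nat))))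
        ++ ((["mold", "inject", "cast"] : List String).map (fun kw => (kw, (4 : Nat))))
      := rfl
  rw [htab]
  rw [List.foldl_append, List.foldl_append, List.foldl_append, List.foldl_append]
  rw [foldl_min_group, foldl_min_group, foldl_min_group, foldl_min_group, foldl_min_group]
  generalize (["print", "3d", "fdm", "sla"] : List String).any (fun word => PySem.Str.isIn word t) = b1
  generalize (["laser", "cut", "engrave"] : List String).any (fun word => PySem.Str.isIn word t) = b2
  generalize (["cnc", "mill", "machine"] : List String).any (fun word => PySem.Str.isIn word t) = b3
  generalize (["sheet", "bend", "fold"] : List String).any (fun word => PySem.Str.isIn word t) = b4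
  generalize (["mold", "inject", "cast"] : List String).any (fun word => PySem.Str.isIn word t) = b5
  cases b1 <;> cases b2 <;> cases b3 <;> cases b4 <;> cases b5 <;> rfl
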